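-- pv_equiv track=rewrite | github.com/ROAR-QUTRC/perseus-v2 | software/ros_ws/src/mapping_autotune/test/test_map_analyzer.py | _make_room_grid
-- ===== SOURCE A (Python) =====
-- def _make_room_grid(width=100, height=100, wall_thickness=1):
--     """Create a simple rectangular room occupancy grid.
--
--     Walls around the perimeter, free space inside, unknown outside is omitted
--     (everything is 'known').
--     """
--     grid = [0] * (width * height)
--     for y in range(height):
--         for x in range(width):
--             # Top and bottom walls
--             if y < wall_thickness or y >= height - wall_thickness:
--                 grid[y * width + x] = 100
--             # Left and right walls
--             elif x < wall_thickness or x >= width - wall_thickness: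
--                 grid[y * width + x] = 100
--     return grid
-- ===== SOURCE B (Python) =====
-- def _make_room_grid(width=100, height=100, wall_thickness=1):
--     """Row-template version: build the two row patterns once, then
--     concatenate one of them per y instead of scatter-writing cells."""
--     if height <= 0:
--         return []
--     wall_row = [100] * width
--     interior_row = [
--         100 if x < wall_thickness or x >= width - wall_thickness else 0
--         for x in range(width)
--     ]
--     grid = []
--     for y in range(height):
--         if y < wall_thickness or y >= height - wall_thickness:
--             grid += wall_row
--         else:
--             grid += interior_row
--     return grid
-- ===== Notes on version B (the rewrite author's own statement) =====
-- stated objective: simpler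
-- what changed: Replaces the pre-zeroed flat buffer with per-cell scatter assignment (nested x/y loops indexing y*width+x) by precomputing two row templates (wall row and interior row) and concatenating one template per row in a single loop.
-- intended difference: On width<0 and height<0 (product positive) A returns a buffer of width*height zeros with no walls drawn, an accident of its pre-allocation; B returns the empty grid, the intended value for non-positive dimensions. — e.g. on _make_room_grid(-2, -2, 1): A returns [0, 0, 0, 0], B returns []
import Mathlib
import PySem

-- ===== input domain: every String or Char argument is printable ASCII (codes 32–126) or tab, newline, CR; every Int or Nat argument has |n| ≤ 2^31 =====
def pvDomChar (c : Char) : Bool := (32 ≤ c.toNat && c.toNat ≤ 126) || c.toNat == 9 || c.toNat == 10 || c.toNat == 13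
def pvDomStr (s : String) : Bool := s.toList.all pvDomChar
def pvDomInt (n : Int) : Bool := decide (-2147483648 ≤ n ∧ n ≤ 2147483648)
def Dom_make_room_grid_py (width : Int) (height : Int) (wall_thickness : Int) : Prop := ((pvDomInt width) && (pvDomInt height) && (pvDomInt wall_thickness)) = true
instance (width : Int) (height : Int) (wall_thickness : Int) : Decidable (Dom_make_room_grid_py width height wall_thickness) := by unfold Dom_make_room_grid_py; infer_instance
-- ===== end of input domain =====

-- B builds the grid by concatenating two precomputed row templates instead of
-- scatter-assigning wall cells into a pre-zeroed flat buffer (objective: simpler).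

-- ===== PORT A =====
def make_room_grid_py (width : Int) (height : Int) (wall_thickness : Int) : List Int :=
  let grid := List.replicate (width * height).toNat 0
  (PySem.List.pyRange 0 height 1).foldl (fun grid y =>
    (PySem.List.pyRange 0 width 1).foldl (fun grid x =>
      if y < wall_thickness ∨ y ≥ height - wall_thickness then
        PySem.List.pySetD grid (y * width + x) 100
      else if x < wall_thickness ∨ x ≥ width - wall_thickness then
        PySem.List.pySetD grid (y * width + x) 100
      else grid) grid) grid

-- ===== PORT B =====
def make_room_grid_py_alt (width : Int) (height : Int) (wall_thickness : Int) : List Int :=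
  if height ≤ 0 then [] else
  let wall_row : List Int := List.replicate width.toNat 100
  let interior_row : List Int := (PySem.List.pyRange 0 width 1).map
    (fun x => if x < wall_thickness ∨ x ≥ width - wall_thickness then (100 : Int) else 0)
  (PySem.List.pyRange 0 height 1).foldl
    (fun grid y =>
      grid ++ (if y < wall_thickness ∨ y ≥ height - wall_thickness then wall_row else interior_row))
    []

-- ===== PRECONDITION & SPEC =====
-- On width < 0 and height < 0 (product positive) A returns a buffer of width*height zeros with
-- no walls drawn, an accident of its pre-allocation; B returns the empty grid, the intended
-- value for non-positive dimensions.
def D_make_room_grid_py (width : Int) (height : Int) (wall_thickness : Int) : Prop :=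
  width < 0 ∧ height < 0
instance (width : Int) (height : Int) (wall_thickness : Int) : Decidable (D_make_room_grid_py width height wall_thickness) := by unfold D_make_room_grid_py; infer_instance

def Spec_make_room_grid_py (width : Int) (height : Int) (wall_thickness : Int) (out : List Int) : Prop := ¬ D_make_room_grid_py width height wall_thickness → out = make_room_grid_py_alt width height wall_thickness
instance (width : Int) (height : Int) (wall_thickness : Int) (out : List Int) : Decidable (Spec_make_room_grid_py width height wall_thickness out) := by unfold Spec_make_room_grid_py; infer_instance

def pvDiffWitness_make_room_grid_py : Int × Int × Int := (-2, -2, 1)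
def pvDiffWitnessOut_make_room_grid_py : (List Int) × (List Int) := ([0, 0, 0, 0], [])

-- ===== CLAIM (what is proved, stated in full; the proofs are below) =====
def Claim_unchanged_make_room_grid_py : Prop := ∀ (width : Int) (height : Int) (wall_thickness : Int), Dom_make_room_grid_py width height wall_thickness → Spec_make_room_grid_py width height wall_thickness (make_room_grid_py width height wall_thickness)
def Claim_changed_make_room_grid_py : Prop := Dom_make_room_grid_py (pvDiffWitness_make_room_grid_py.1) (pvDiffWitness_make_room_grid_py.2.1) (pvDiffWitness_make_room_grid_py.2.2) ∧ D_make_room_grid_py (pvDiffWitness_make_room_grid_py.1) (pvDiffWitness_make_room_grid_py.2.1) (pvDiffWitness_make_room_grid_py.2.2) ∧ make_room_grid_py (pvDiffWitness_make_room_grid_py.1) (pvDiffWitness_make_room_grid_py.2.1) (pvDiffWitness_make_room_grid_py.2.2) = pvDiffWitnessOut_make_room_grid_py.1 ∧ make_room_grid_py_alt (pvDiffWitness_make_room_grid_py.1) (pvDiffWitness_make_room_grid_py.2.1) (pvDiffWitness_make_room_grid_py.2.2) = pvDiffWitnessOut_make_room_grid_py.2 ∧ pvDiffWitnessOut_make_room_grid_py.1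 ≠ pvDiffWitnessOut_make_room_grid_py.2
def Claim_exact_make_room_grid_py : Prop := ∀ (width : Int) (height : Int) (wall_thickness : Int), Dom_make_room_grid_py width height wall_thickness → D_make_room_grid_py width height wall_thickness → make_room_grid_py width height wall_thickness ≠ make_room_grid_py_alt width height wall_thickness

-- ===== LEMMAS AND PROOFS =====

theorem foldl_id {α β : Type} (l : List β) (init : α) :
    l.foldl (fun g _ => g) init = init := by
  induction l generalizing init with
  | nil => rfl
  | cons a l ih => exact ih init

-- Inner loop of A on a row of fresh zeros: writes exactly the cells satisfying P.
theorem inner_row (P : Int → Prop) [DecidablePred P] (pre : List Int) :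
    ∀ (n : Nat) (suf : List Int),
    (PySem.List.pyRange 0 (n : Int) 1).foldl
      (fun (g : List Int) (x : Int) =>
        if P x then PySem.List.pySetD g ((pre.length : Int) + x) 100 else g)
      (pre ++ List.replicate n 0 ++ suf)
    = pre ++ (PySem.List.pyRange 0 (n : Int) 1).map (fun x => if P x then (100 : Int) else 0) ++ suf := by
  intro n
  induction n with
  | zero => intro suf; simp [PySem.List.pyRange_one_eq_nil]
  | succ n ih =>
    intro suf
    have hsucc : ((n + 1 : Nat) : Int) = (n : Int) + 1 := by push_cast; ring
    rw [hsucc, PySem.List.pyRange_one_succ_right (by positivity), List.foldl_append,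
      List.map_append, List.replicate_succ' (n := n)]
    have h0 : pre ++ (List.replicate n (0:Int) ++ [0]) ++ suf
        = pre ++ List.replicate n (0:Int) ++ ([0] ++ suf) := by simp
    rw [h0, ih ([0] ++ suf)]
    have hassoc : pre ++ (PySem.List.pyRange 0 (n:Int) 1).map (fun x => if P x then (100:Int) else 0) ++ ([0] ++ suf)
        = (pre ++ (PySem.List.pyRange 0 (n:Int) 1).map (fun x => if P x then (100:Int) else 0)) ++ (0 :: suf) := by
      simp
    have hlen : (pre ++ (PySem.List.pyRange 0 (n:Int) 1).map (fun x => if P x then (100:Int) else 0)).length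
        = pre.length + n := by simp [PySem.List.length_pyRange_one]
    by_cases hp : P (n : Int)
    · simp only [List.foldl_cons, List.foldl_nil, if_pos hp]
      rw [hassoc]
      have hc : ((pre.length : Int) + (n : Int)) = ((pre.length + n : Nat) : Int) := by push_cast; ring
      rw [hc, PySem.List.pySetD_natCast, ← hlen, List.set_append_right _ _ (le_refl _)]
      simp [hp]
    · simp only [List.foldl_cons, List.foldl_nil, if_neg hp]
      simp [hp]

-- Row produced by A's inner loop equals one of B's two templates.
theorem rowMap_eq (width height wall_thickness y : Int) :
    (PySem.List.pyRange 0 width 1).map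
      (fun x => if (y < wall_thickness ∨ y ≥ height - wall_thickness) ∨
                   (x < wall_thickness ∨ x ≥ width - wall_thickness)
                then (100 : Int) else 0)
    = (if y < wall_thickness ∨ y ≥ height - wall_thickness
       then List.replicate width.toNat (100 : Int)
       else (PySem.List.pyRange 0 width 1).map
         (fun x => if x < wall_thickness ∨ x ≥ width - wall_thickness then (100 : Int) else 0)) := by
  by_cases hy : y < wall_thickness ∨ y ≥ height - wall_thickness
  · rw [if_pos hy,
      List.map_congr_left (g := fun (_ : Int) => (100 : Int)) (fun x _ => if_pos (Or.inl hy))]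
    rw [List.map_const', PySem.List.length_pyRange_one]
    simp
  · rw [if_neg hy]
    refine List.map_congr_left (fun x _ => ?_)
    by_cases hx : x < wall_thickness ∨ x ≥ width - wall_thickness
    · rw [if_pos (Or.inr hx), if_pos hx]
    · rw [if_neg (by tauto), if_neg hx]

-- A's two-branch body equals the single-condition body.
theorem body_eq (width height wall_thickness y : Int) (g : List Int) (x : Int) :
    (if y < wall_thickness ∨ y ≥ height - wall_thickness then
        PySem.List.pySetD g (y * width + x) 100
      else if x < wall_thickness ∨ x ≥ width - wall_thickness then
        PySem.List.pySetD g (y * width + x) 100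
      else g)
    = (if (y < wall_thickness ∨ y ≥ height - wall_thickness) ∨
          (x < wall_thickness ∨ x ≥ width - wall_thickness) then
        PySem.List.pySetD g (y * width + x) 100 else g) := by
  by_cases hy : y < wall_thickness ∨ y ≥ height - wall_thickness
  · rw [if_pos hy, if_pos (Or.inl hy)]
  · rw [if_neg hy]
    by_cases hx : x < wall_thickness ∨ x ≥ width - wall_thickness
    · rw [if_pos hx, if_pos (Or.inr hx)]
    · rw [if_neg hx, if_neg (by tauto)]

-- Outer loop: processing rows s .. s+m-1 turns the remaining zero block into rows.
theorem outer_loop (w : Nat) (height wall_thickness : Int)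
    (m : Nat) : ∀ (s : Int), 0 ≤ s → ∀ (done : List Int),
    done.length = s.toNat * w →
    (PySem.List.pyRange s (s + m) 1).foldl (fun grid y =>
      (PySem.List.pyRange 0 (w : Int) 1).foldl (fun grid x =>
        if y < wall_thickness ∨ y ≥ height - wall_thickness then
          PySem.List.pySetD grid (y * (w : Int) + x) 100
        else if x < wall_thickness ∨ x ≥ (w : Int) - wall_thickness then
          PySem.List.pySetD grid (y * (w : Int) + x) 100
        else grid) grid)
      (done ++ List.replicate (m * w) 0)
    = done ++ (PySem.List.pyRange s (s + m) 1).flatMap (fun y =>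
        if y < wall_thickness ∨ y ≥ height - wall_thickness
        then List.replicate w (100 : Int)
        else (PySem.List.pyRange 0 (w : Int) 1).map
          (fun x => if x < wall_thickness ∨ x ≥ (w : Int) - wall_thickness then (100 : Int) else 0)) := by
  induction m with
  | zero =>
    intro s hs done hd
    simp
  | succ m ih =>
    intro s hs done hd
    have hcons : PySem.List.pyRange s (s + ((m+1 : Nat) : Int)) 1
        = s :: PySem.List.pyRange (s+1) (s + ((m+1:Nat) : Int)) 1 :=
      PySem.List.pyRange_one_cons (by push_cast; omega)
    rw [hcons, List.foldl_cons, List.flatMap_cons]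
    have hsplit : List.replicate ((m+1) * w) (0:Int)
        = List.replicate w 0 ++ List.replicate (m * w) 0 := by
      rw [← List.replicate_add]; congr 1; ring
    have hfe : (fun (g : List Int) (x : Int) =>
          if s < wall_thickness ∨ s ≥ height - wall_thickness then
            PySem.List.pySetD g (s * (w : Int) + x) 100
          else if x < wall_thickness ∨ x ≥ (w : Int) - wall_thickness then
            PySem.List.pySetD g (s * (w : Int) + x) 100
          else g)
        = (fun (g : List Int) (x : Int) =>
            if (s < wall_thickness ∨ s ≥ height - wall_thickness) ∨
               (x < wall_thickness ∨ x ≥ (w : Int) - wall_thickness) then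
              PySem.List.pySetD g ((done.length : Int) + x) 100 else g) := by
      funext g x
      have hsw : s * (w : Int) = (done.length : Int) := by
        rw [hd]; push_cast; rw [Int.toNat_of_nonneg hs]
      rw [body_eq (w : Int) height wall_thickness s g x, hsw]
    have hinner :
        (PySem.List.pyRange 0 (w : Int) 1).foldl (fun grid x =>
          if s < wall_thickness ∨ s ≥ height - wall_thickness then
            PySem.List.pySetD grid (s * (w : Int) + x) 100
          else if x < wall_thickness ∨ x ≥ (w : Int) - wall_thickness then
            PySem.List.pySetD grid (s * (w : Int) + x) 100
          else grid)
          (done ++ List.replicate ((m+1) * w) 0)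
        = done ++ (if s < wall_thickness ∨ s ≥ height - wall_thickness
            then List.replicate w (100 : Int)
            else (PySem.List.pyRange 0 (w : Int) 1).map
              (fun x => if x < wall_thickness ∨ x ≥ (w : Int) - wall_thickness then (100 : Int) else 0))
          ++ List.replicate (m * w) 0 := by
      rw [hfe, hsplit, ← List.append_assoc,
        inner_row (fun x => (s < wall_thickness ∨ s ≥ height - wall_thickness) ∨
            (x < wall_thickness ∨ x ≥ (w : Int) - wall_thickness)) done w
            (List.replicate (m * w) 0),
        rowMap_eq (w : Int) height wall_thickness s]
      simp
    rw [hinner, List.append_assoc done]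
    have hlen' : (done ++ (if s < wall_thickness ∨ s ≥ height - wall_thickness
          then List.replicate w (100 : Int)
          else (PySem.List.pyRange 0 (w : Int) 1).map
            (fun x => if x < wall_thickness ∨ x ≥ (w : Int) - wall_thickness then (100 : Int) else 0))).length
        = (s+1).toNat * w := by
      have h1 : (s+1).toNat = s.toNat + 1 := by omega
      by_cases hy : s < wall_thickness ∨ s ≥ height - wall_thickness
      · rw [if_pos hy]
        simp [hd, h1]
        ring
      · rw [if_neg hy]
        simp [hd, PySem.List.length_pyRange_one, h1]
        ring
    have harg : s + ((m+1 : Nat) : Int) = (s + 1) + (m : Nat) := by push_cast; ring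
    rw [harg] at *
    rw [← List.append_assoc, ih (s+1) (by omega) _ hlen']
    simp

-- B's foldl-append equals flatMap.
theorem foldl_append_rows {α β : Type} (l : List α) (f : α → List β) :
    ∀ acc : List β, l.foldl (fun g y => g ++ f y) acc = acc ++ l.flatMap f := by
  induction l with
  | nil => intro acc; simp
  | cons a l ih => intro acc; simp [ih, List.flatMap_cons]

theorem alt_eq_flatMap (width height wall_thickness : Int) :
    make_room_grid_py_alt width height wall_thickness
    = (PySem.List.pyRange 0 height 1).flatMap (fun y =>
        if y < wall_thickness ∨ y ≥ height - wall_thickness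
        then List.replicate width.toNat (100 : Int)
        else (PySem.List.pyRange 0 width 1).map
          (fun x => if x < wall_thickness ∨ x ≥ width - wall_thickness then (100 : Int) else 0)) := by
  unfold make_room_grid_py_alt
  by_cases hh : height ≤ 0
  · rw [if_pos hh, PySem.List.pyRange_one_eq_nil hh, List.flatMap_nil]
  · rw [if_neg hh, foldl_append_rows]
    simp

-- ===== VERDICT (by name: the statement is the Claim_ definition above) =====
theorem make_room_grid_py_spec : Claim_unchanged_make_room_grid_py := by
  unfold Claim_unchanged_make_room_grid_py
  intro width height wall_thickness _
  unfold Spec_make_room_grid_py D_make_room_grid_py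
  intro hD
  rw [alt_eq_flatMap]
  unfold make_room_grid_py
  by_cases hh : height ≤ 0
  · have hr : PySem.List.pyRange 0 height 1 = [] := PySem.List.pyRange_one_eq_nil hh
    have hwh : (width * height).toNat = 0 := by
      rcases lt_or_ge height 0 with hneg | hpos
      · have hw0 : 0 ≤ width := by by_contra h; exact hD ⟨by omega, hneg⟩
        have : width * height ≤ 0 := mul_nonpos_of_nonneg_of_nonpos hw0 hh
        omega
      · have : height = 0 := le_antisymm hh hpos
        simp [this]
    simp [hr, hwh]
  · replace hh : 0 < height := by omega
    by_cases hw : width < 0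
    · have hr : PySem.List.pyRange 0 width 1 = [] := PySem.List.pyRange_one_eq_nil (by omega)
      have hwh : (width * height).toNat = 0 := by
        have : width * height ≤ 0 := by
          have := mul_nonpos_of_nonpos_of_nonneg (by omega : width ≤ 0) (by omega : (0:Int) ≤ height)
          omega
        omega
      have hwn : width.toNat = 0 := by omega
      simp only [hr, List.foldl_nil, hwh, List.replicate_zero, hwn]
      rw [foldl_id]
      symm
      rw [List.flatMap_eq_nil_iff]
      intro y _
      by_cases hy : y < wall_thickness ∨ y ≥ height - wall_thickness
      · rw [if_pos hy]
      · rw [if_neg hy, List.map_nil]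
    · replace hw : 0 ≤ width := by omega
      have hwc : ((width.toNat : Int)) = width := Int.toNat_of_nonneg hw
      have hhc : height = (0 : Int) + (height.toNat : Int) := by omega
      have hwh : (width * height).toNat = height.toNat * width.toNat := by
        rcases Int.eq_ofNat_of_zero_le hw with ⟨a, ha⟩
        rcases Int.eq_ofNat_of_zero_le (le_of_lt hh) with ⟨b, hb⟩
        rw [ha, hb]
        simp only [← Nat.cast_mul, Int.toNat_natCast]
        exact Nat.mul_comm a b
      have := outer_loop width.toNat height wall_thickness height.toNat 0 (le_refl 0) [] (by simp)
      simp only [List.nil_append] at this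
      rw [hwc] at this
      rw [← hhc] at this
      rw [hwh]
      exact this

theorem make_room_grid_py_changed : Claim_changed_make_room_grid_py := by
  unfold Claim_changed_make_room_grid_py; decide

theorem make_room_grid_py_tight : Claim_exact_make_room_grid_py := by
  unfold Claim_exact_make_room_grid_py
  intro width height wall_thickness _ hD
  obtain ⟨hw, hh⟩ := hD
  have hB : make_room_grid_py_alt width height wall_thickness = [] := by
    unfold make_room_grid_py_alt
    rw [if_pos (by omega : height ≤ 0)]
  have hA : make_room_grid_py width height wall_thickness
      = List.replicate (width * height).toNat 0 := by
    unfold make_room_grid_py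
    rw [PySem.List.pyRange_one_eq_nil (by omega : height ≤ 0)]
    rfl
  have hpos : 1 ≤ (width * height).toNat := by
    have : 1 ≤ width * height := by
      have := mul_pos_of_neg_of_neg hw hh
      omega
    omega
  rw [hA, hB]
  intro hcontra
  have := congrArg List.length hcontra
  simp at this
  omega
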